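-- pv_equiv track=rewrite | github.com/JannaKim/PS | programmers/캐시트라이.py | solution
-- ===== SOURCE A (Python) =====
-- class Trie:
--     def __init__(self) :
--         self.count = 0
--         self.child = {}
--     def insert(self, s, pos) :
--         self.count = self.count + 1
--         if pos == len(s) :
--             return
--         if s[pos] not in self.child:
--             self.child[s[pos]]= Trie()
--         self.child[s[pos]].insert(s,pos+1)
--
--     def find(self, s, pos) :
--         if self.count ==1:
--             return pos
--         elif pos==len(s):
--             return pos
--         else:
--             return self.child[s[pos]].find(s,pos+1)
--
-- def solution(words):
--     ans=0
--     Hello= Trie()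
--     for word in words:
--         Hello.insert(word, 0)
--
--     for word in words:
--         ans+=Hello.find(word,0)
--     return ans
-- ===== SOURCE B (Python) =====
-- def _lcp(a, b):
--     k = 0
--     for x, y in zip(a, b):
--         if x != y:
--             break
--         k += 1
--     return k
--
-- def solution(words):
--     if len(words) <= 1:
--         return 0
--     total = 0
--     for w in words:
--         if words.count(w) >= 2:
--             total += len(w)
--         else:
--             best = 0
--             for v in words:
--                 if v != w:
--                     l = _lcp(w, v)
--                     if l > best:
--                         best = l
--             total += min(best + 1, len(w))
--     return total
-- ===== Notes on version B (the rewrite author's own statement) =====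
-- stated objective: simpler
-- what changed: Replaced the mutable Trie class (build + per-word walk) with a direct pairwise computation: each word contributes min(1 + max LCP with any other word, len(word)), with duplicates contributing len(word); no tree data structure at all.
import Mathlib
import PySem

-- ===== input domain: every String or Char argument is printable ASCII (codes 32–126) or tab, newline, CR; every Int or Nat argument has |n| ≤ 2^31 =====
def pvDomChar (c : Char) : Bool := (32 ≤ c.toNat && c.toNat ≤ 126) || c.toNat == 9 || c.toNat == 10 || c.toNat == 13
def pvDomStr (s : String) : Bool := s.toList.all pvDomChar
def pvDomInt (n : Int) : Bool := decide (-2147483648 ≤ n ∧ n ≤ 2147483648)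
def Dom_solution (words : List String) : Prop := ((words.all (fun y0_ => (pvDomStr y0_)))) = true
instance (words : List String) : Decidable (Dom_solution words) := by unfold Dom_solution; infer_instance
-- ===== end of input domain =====

-- B replaces A's mutable Trie (build + per-word walk) by a direct pairwise max-LCP computation per word; objective: simpler.

-- ===== PORT A =====
-- the Trie class: count + dict of children (a Char-keyed association structure; mutual pair instead of a nested inductive)
mutual
inductive Trie : Type where
  | mk : Nat → Children → Trie
inductive Children : Type where
  | nil : Children
  | cons : Char → Trie → Children → Children
end

def Trie.count : Trie → Nat
  | .mk n _ => n

def Trie.children : Trie → Children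
  | .mk _ ch => ch

-- self.child[c] lookup (none = key absent)
def Children.get? : Children → Char → Option Trie
  | .nil, _ => none
  | .cons a t rest, c => if c = a then some t else Children.get? rest c

-- self.child[c] = t (overwrite in place, else append)
def Children.set : Children → Char → Trie → Children
  | .nil, c, t => .cons c t .nil
  | .cons a t0 rest, c, t => if c = a then .cons a t rest else .cons a t0 (Children.set rest c t)

def Trie.emptyT : Trie := .mk 0 .nil

-- Trie.insert(self, s, pos); the pair (s, pos) is carried as the suffix s[pos:]
def Trie.insertGo : Trie → List Char → Trie
  | .mk n ch, [] => .mk (n + 1) ch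
  | .mk n ch, c :: rest =>
      .mk (n + 1) (ch.set c (Trie.insertGo ((ch.get? c).getD Trie.emptyT) rest))
  termination_by _ s => s.length

-- Trie.find(self, s, pos); (s, pos) carried as the suffix s[pos:] plus the counter pos.
-- none = Python's KeyError on a missing child (unreachable from `solution`, where every word was inserted).
def Trie.findGo : Trie → List Char → Nat → Option Nat
  | t, suffix, pos =>
    if t.count = 1 then some pos
    else
      match suffix with
      | [] => some pos
      | c :: rest =>
        match t.children.get? c with
        | some t' => Trie.findGo t' rest (pos + 1)
        | none => none
  termination_by _ s _ => s.length

def solution (words : List String) : Int :=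
  let root := words.foldl (fun t w => Trie.insertGo t w.toList) Trie.emptyT
  -- ans += Hello.find(word, 0); `.getD 0` sits on the KeyError branch, which `solution` never reaches
  words.foldl (fun ans w => ans + (((Trie.findGo root w.toList 0).getD 0 : Nat) : Int)) 0

-- ===== PORT B =====
-- _lcp(a, b): longest common prefix length
def lcpLen : List Char → List Char → Nat
  | x :: xs, y :: ys => if x = y then lcpLen xs ys + 1 else 0
  | _, _ => 0

def solution_alt (words : List String) : Int :=
  if words.length ≤ 1 then 0
  else
    words.foldl (fun total w =>
      if 2 ≤ PySem.List.count words w then total + (w.toList.length : Int)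
      else
        let best := words.foldl (fun b v =>
          if v ≠ w then
            let l := lcpLen w.toList v.toList
            if b < l then l else b
          else b) 0
        total + ((min (best + 1) w.toList.length : Nat) : Int)) 0

-- ===== PRECONDITION & SPEC =====
def Spec_solution (words : List String) (out : Int) : Prop := out = solution_alt words
instance (words : List String) (out : Int) : Decidable (Spec_solution words out) := by unfold Spec_solution; infer_instance

-- ===== CLAIM (what is proved, stated in full; the proofs are below) =====
def Claim_equal_solution : Prop := ∀ (words : List String), Dom_solution words → Spec_solution words (solution words)

-- ===== LEMMAS AND PROOFS =====

-- `pref p w` = p is a prefix of w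
def pref : List Char → List Char → Bool
  | [], _ => true
  | _ :: _, [] => false
  | c :: p, a :: s => c = a && pref p s

-- subtrie at a path
def subAt? : Trie → List Char → Option Trie
  | t, [] => some t
  | t, c :: p =>
    match t.children.get? c with
    | some t' => subAt? t' p
    | none => none
  termination_by _ p => p.length

def subCnt (t : Trie) (p : List Char) : Nat :=
  match subAt? t p with
  | some t' => t'.count
  | none => 0

theorem get_set : ∀ (ch : Children) (a : Char) (t : Trie) (c : Char),
    (ch.set a t).get? c = if c = a then some t else ch.get? c
  | .nil, a, t, c => by
      by_cases h : c = a <;> simp [Children.set, Children.get?, h]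
  | .cons b t0 rest, a, t, c => by
      by_cases hba : a = b
      · subst hba
        by_cases h : c = a <;> simp [Children.set, Children.get?, h]
      · by_cases h : c = b
        · have hab : ¬ b = a := fun hh => hba hh.symm
          simp [Children.set, Children.get?, hba, h, hab]
        · simp [Children.set, Children.get?, hba, h, get_set rest a t c]

theorem subCnt_nil (t : Trie) : subCnt t [] = t.count := by
  simp [subCnt, subAt?]

theorem subCnt_cons (t : Trie) (c : Char) (p : List Char) :
    subCnt t (c :: p) = (match t.children.get? c with
      | some t' => subCnt t' p
      | none => 0) := by
  unfold subCnt
  rw [subAt?]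
  cases t.children.get? c <;> simp

theorem subCnt_empty (p : List Char) : subCnt Trie.emptyT p = 0 := by
  cases p with
  | nil => simp [subCnt_nil, Trie.emptyT, Trie.count]
  | cons c p => rw [subCnt_cons]; simp [Trie.emptyT, Trie.children, Children.get?]

theorem subCnt_insert (p : List Char) (t : Trie) (s : List Char) :
    subCnt (Trie.insertGo t s) p = subCnt t p + (if pref p s then 1 else 0) := by
  induction p generalizing t s with
  | nil =>
      cases t with
      | mk n ch => cases s <;> simp [Trie.insertGo, subCnt_nil, Trie.count, pref]
  | cons c p ih =>
      cases t with
      | mk n ch =>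
        cases s with
        | nil =>
            rw [Trie.insertGo, subCnt_cons, subCnt_cons]
            simp [Trie.children, pref]
        | cons a rest =>
            rw [Trie.insertGo, subCnt_cons, subCnt_cons]
            simp only [Trie.children, get_set]
            by_cases hca : c = a
            · subst hca
              have : (match ch.get? c with
                  | some t' => subCnt t' p
                  | none => 0) = subCnt ((ch.get? c).getD Trie.emptyT) p := by
                cases ch.get? c with
                | none => simp [subCnt_empty]
                | some t' => rfl
              rw [this]
              simp only [pref, decide_true, Bool.true_and]
              exact ih _ _
            · simp [hca, pref]

theorem subCnt_build (l : List String) (t : Trie) (p : List Char) :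
    subCnt (l.foldl (fun t w => Trie.insertGo t w.toList) t) p
      = subCnt t p + (l.map String.toList).countP (fun w => pref p w) := by
  induction l generalizing t with
  | nil => simp
  | cons w l ih =>
      simp only [List.foldl_cons, List.map_cons, List.countP_cons, ih, subCnt_insert]
      omega

theorem subAt?_append (p : List Char) (root t : Trie) (c : Char)
    (h : subAt? root p = some t) : subAt? root (p ++ [c]) = t.children.get? c := by
  induction p generalizing root with
  | nil =>
      have : root = t := by simpa [subAt?] using h
      subst this
      simp only [List.nil_append]
      rw [subAt?]
      cases hg : root.children.get? c <;> simp [subAt?]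
  | cons a p ih =>
      rw [subAt?] at h
      rw [List.cons_append, subAt?]
      cases hg : root.children.get? a with
      | none => rw [hg] at h; simp at h
      | some t1 =>
          rw [hg] at h
          exact ih t1 h

-- prefix facts
theorem pref_refl_append (p suffix : List Char) : pref p (p ++ suffix) = true := by
  induction p with
  | nil => rfl
  | cons c p ih => simp [pref, ih]

theorem pref_snoc (p : List Char) (c : Char) (rest : List Char) :
    pref (p ++ [c]) (p ++ c :: rest) = true := by
  induction p with
  | nil => simp [pref]
  | cons a p ih => simp [pref, ih]

theorem pref_take (u : List Char) (k : Nat) : pref (u.take k) u = true := by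
  induction u generalizing k with
  | nil => cases k <;> rfl
  | cons x xs ih => cases k <;> simp [pref, ih]

theorem lcpLen_le_left (u v : List Char) : lcpLen u v ≤ u.length := by
  induction u generalizing v with
  | nil => cases v <;> simp [lcpLen]
  | cons x xs ih =>
      cases v with
      | nil => simp [lcpLen]
      | cons y ys =>
          by_cases h : x = y <;> simp [lcpLen, h]
          exact ih ys

theorem pref_take_iff_lcp (u v : List Char) (k : Nat) (hk : k ≤ u.length) :
    (pref (u.take k) v = true ↔ k ≤ lcpLen u v) := by
  induction u generalizing v k with
  | nil =>
      have hk0 : k = 0 := Nat.le_zero.mp (by simpa using hk)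
      subst hk0
      simp [pref]
  | cons x xs ih =>
      cases k with
      | zero => simp [pref]
      | succ k =>
          cases v with
          | nil => simp [pref, lcpLen]
          | cons y ys =>
              by_cases h : x = y
              · subst h
                have hih := ih ys k (by simpa using Nat.le_of_succ_le_succ hk)
                simp [pref, lcpLen, hih]
                try omega
              · simp [pref, lcpLen, h]

-- the specification recursion that `find` implements on the built trie
def dSpec (ws : List (List Char)) : List Char → List Char → Nat
  | p, suffix =>
    if ws.countP (fun w => pref p w) = 1 then p.length
    else
      match suffix with
      | [] => p.length
      | c :: rest => dSpec ws (p ++ [c]) rest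
  termination_by _ suffix => suffix.length

theorem find_spec (ws : List (List Char)) (root : Trie)
    (hroot : ∀ q, subCnt root q = ws.countP (fun w => pref q w)) :
    ∀ (suffix p : List Char) (t : Trie), subAt? root p = some t → (p ++ suffix) ∈ ws →
      Trie.findGo t suffix p.length = some (dSpec ws p suffix) := by
  intro suffix
  induction suffix with
  | nil =>
      intro p t hsub hmem
      have hcnt : t.count = ws.countP (fun w => pref p w) := by
        have h2 := hroot p
        unfold subCnt at h2
        rw [hsub] at h2
        simpa using h2
      rw [Trie.findGo, dSpec]
      by_cases h1 : ws.countP (fun w => pref p w) = 1 <;> simp [hcnt, h1]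
  | cons c rest ih =>
      intro p t hsub hmem
      have hcnt : t.count = ws.countP (fun w => pref p w) := by
        have h2 := hroot p
        unfold subCnt at h2
        rw [hsub] at h2
        simpa using h2
      rw [Trie.findGo, dSpec]
      by_cases h1 : ws.countP (fun w => pref p w) = 1
      · simp [hcnt, h1]
      · have hchildpos : 1 ≤ subCnt root (p ++ [c]) := by
          rw [hroot]
          have hpr : pref (p ++ [c]) (p ++ c :: rest) = true := pref_snoc p c rest
          have hpos : 0 < ws.countP (fun w => pref (p ++ [c]) w) :=
            List.countP_pos_iff.mpr ⟨p ++ c :: rest, hmem, by simpa using hpr⟩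
          omega
        have hsubapp := subAt?_append p root t c hsub
        unfold subCnt at hchildpos
        rw [hsubapp] at hchildpos
        cases hget : t.children.get? c with
        | none => rw [hget] at hchildpos; simp at hchildpos
        | some t' =>
            have hsub' : subAt? root (p ++ [c]) = some t' := by rw [hsubapp, hget]
            have hmem' : ((p ++ [c]) ++ rest) ∈ ws := by simpa using hmem
            have hrec := ih (p ++ [c]) t' hsub' hmem'
            simp only [List.length_append, List.length_cons, List.length_nil] at hrec
            simp [hcnt, h1, hrec]

-- duplicate case: the count along every prefix of u is ≥ 2, so find walks to the end
theorem dSpec_big (ws : List (List Char)) :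
    ∀ (suffix p : List Char),
      (∀ q : List Char, pref q (p ++ suffix) = true → ws.countP (fun w => pref q w) ≠ 1) →
      dSpec ws p suffix = (p ++ suffix).length := by
  intro suffix
  induction suffix with
  | nil =>
      intro p h
      rw [dSpec, if_neg (h p (pref_refl_append p []))]
      simp
  | cons c rest ih =>
      intro p h
      rw [dSpec, if_neg (h p (pref_refl_append p (c :: rest)))]
      have := ih (p ++ [c]) (by intro q hq; exact h q (by simpa using hq))
      rw [this]
      simp

-- unique case: the smallest depth where the count drops to 1 is best + 1
theorem dSpec_min (ws : List (List Char)) (u : List Char) (best : Nat)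
    (hC : ∀ k, k ≤ u.length → (ws.countP (fun w => pref (u.take k) w) = 1 ↔ best < k)) :
    ∀ (suffix p : List Char), p ++ suffix = u →
      dSpec ws p suffix = min (max (best + 1) p.length) u.length := by
  intro suffix
  induction suffix with
  | nil =>
      intro p hu
      have hp : p = u := by simpa using hu
      rw [hp, dSpec]
      by_cases h1 : ws.countP (fun w => pref u w) = 1
      · rw [if_pos h1]
        have hb : best < u.length := by
          have h2 := (hC u.length le_rfl).mp
          simp only [List.take_length] at h2
          exact h2 h1
        omega
      · rw [if_neg h1]
        have hb : ¬ best < u.length := by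
          intro hlt
          have h2 := (hC u.length le_rfl).mpr hlt
          simp only [List.take_length] at h2
          exact h1 h2
        omega
  | cons c rest ih =>
      intro p hu
      have hplen : p.length + (rest.length + 1) = u.length := by
        rw [← hu]; simp
      have htakep : u.take p.length = p := by
        rw [← hu]; exact List.take_left
      rw [dSpec]
      by_cases h1 : ws.countP (fun w => pref p w) = 1
      · have hbest : best < p.length := by
          have := hC p.length (by omega)
          rw [htakep] at this
          exact this.mp h1
        rw [if_pos h1]
        omega
      · have hbest : p.length ≤ best := by
          by_contra hneg
          have hlt : best < p.length := by omega
          have := hC p.length (by omega)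
          rw [htakep] at this
          exact h1 (this.mpr hlt)
        rw [if_neg h1]
        have := ih (p ++ [c]) (by simpa using hu)
        rw [this]
        simp only [List.length_append, List.length_cons, List.length_nil]
        omega

-- countP split along a second predicate
theorem countP_split {α : Type} (l : List α) (p q : α → Bool) :
    l.countP p = l.countP (fun v => p v && q v) + l.countP (fun v => p v && !q v) := by
  induction l with
  | nil => simp
  | cons x l ih =>
      simp only [List.countP_cons, ih]
      cases hp : p x <;> cases hq : q x <;> simp [hp, hq] <;> omega


-- inner fold: characterisation of B's running maximum
theorem bestFold_ge (w : String) :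
    ∀ (l : List String) (b : Nat), b ≤ l.foldl (fun b v =>
      if v ≠ w then
        let l := lcpLen w.toList v.toList
        if b < l then l else b
      else b) b := by
  intro l
  induction l with
  | nil => intro b; simp
  | cons x l ih =>
      intro b
      rw [List.foldl_cons]
      refine le_trans ?_ (ih _)
      by_cases h1 : x ≠ w
      · rw [if_pos h1]
        show b ≤ if b < lcpLen w.toList x.toList then lcpLen w.toList x.toList else b
        split_ifs <;> omega
      · rw [if_neg h1]

theorem bestFold_mem (w : String) :
    ∀ (l : List String) (b : Nat) (v : String), v ∈ l → v ≠ w →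
      lcpLen w.toList v.toList ≤ l.foldl (fun b v =>
        if v ≠ w then
          let l := lcpLen w.toList v.toList
          if b < l then l else b
        else b) b := by
  intro l
  induction l with
  | nil => intro b v hv; simp at hv
  | cons x l ih =>
      intro b v hv hvw
      rcases List.mem_cons.mp hv with h | h
      · subst h
        rw [List.foldl_cons]
        refine le_trans ?_ (bestFold_ge w l _)
        rw [if_pos hvw]
        show lcpLen w.toList v.toList ≤ if b < lcpLen w.toList v.toList then lcpLen w.toList v.toList else b
        split_ifs <;> omega
      · rw [List.foldl_cons]
        exact ih _ v h hvw

theorem bestFold_src (w : String) :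
    ∀ (l : List String) (b : Nat),
      l.foldl (fun b v =>
        if v ≠ w then
          let l := lcpLen w.toList v.toList
          if b < l then l else b
        else b) b = b ∨
      ∃ v ∈ l, v ≠ w ∧ l.foldl (fun b v =>
        if v ≠ w then
          let l := lcpLen w.toList v.toList
          if b < l then l else b
        else b) b = lcpLen w.toList v.toList := by
  intro l
  induction l with
  | nil => intro b; left; rfl
  | cons x l ih =>
      intro b
      rcases ih (if x ≠ w then (let l := lcpLen w.toList x.toList; if b < l then l else b) else b) with h | ⟨v, hv, hvw, h⟩
      · simp only [List.foldl_cons] at *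
        rw [h]
        by_cases hxw : x = w
        · left; simp [hxw]
        · by_cases hbl : b < lcpLen w.toList x.toList
          · right; exact ⟨x, List.mem_cons_self, hxw, by simp [hxw, hbl]⟩
          · left; simp [hxw, hbl]
      · right
        exact ⟨v, List.mem_cons_of_mem _ hv, hvw, h⟩

theorem toList_inj (a b : String) (h : a.toList = b.toList) : a = b := by
  have h2 : String.ofList a.toList = String.ofList b.toList := by rw [h]
  simpa using h2

-- the per-word equality: A's find-value equals B's per-word term, given n ≥ 2
theorem perword (words : List String) (hn : 2 ≤ words.length) (w : String) (hw : w ∈ words) :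
    dSpec (words.map String.toList) [] w.toList =
      (if 2 ≤ PySem.List.count words w then w.toList.length
       else
        (min ((words.foldl (fun b v =>
          if v ≠ w then
            let l := lcpLen w.toList v.toList
            if b < l then l else b
          else b) 0) + 1) w.toList.length)) := by
  have hcount_eq : PySem.List.count words w = words.count w := by
    simp [PySem.List.count]
  set u := w.toList with hu
  set ws := words.map String.toList with hws
  have hmemu : u ∈ ws := List.mem_map_of_mem hw
  -- countP (pref p ·) splits as (copies of u) + (others), whenever p is a prefix of u
  have hsplit : ∀ p : List Char, pref p u = true →
      ws.countP (fun v => pref p v) =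
        ws.count u + ws.countP (fun v => pref p v && !(v == u)) := by
    intro p hp
    rw [countP_split ws (fun v => pref p v) (fun v => v == u)]
    congr 1
    rw [List.count_eq_countP]
    apply List.countP_congr
    intro v _
    by_cases hvu : v = u
    · subst hvu; simp [hp]
    · simp [hvu]
  have hcount_ws : ws.count u = words.count w := by
    rw [hws, hu]
    exact List.count_map_of_injective _ _ (fun a b => toList_inj a b) _
  by_cases hdup : 2 ≤ PySem.List.count words w
  · rw [if_pos hdup]
    rw [hcount_eq] at hdup
    apply dSpec_big
    intro q hq
    rw [List.nil_append] at hq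
    rw [hsplit q hq, hcount_ws]
    omega
  · rw [if_neg hdup]
    rw [hcount_eq] at hdup
    have hc1 : words.count w = 1 := by
      have : 1 ≤ words.count w := List.one_le_count_iff.mpr hw
      omega
    set best := words.foldl (fun b v =>
          if v ≠ w then
            let l := lcpLen w.toList v.toList
            if b < l then l else b
          else b) 0 with hbest
    have hC : ∀ k, k ≤ u.length → (ws.countP (fun v => pref (u.take k) v) = 1 ↔ best < k) := by
      intro k hk
      rw [hsplit (u.take k) (pref_take u k), hcount_ws, hc1]
      have hothers : ws.countP (fun v => pref (u.take k) v && !(v == u)) = 0 ↔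
          ∀ v ∈ words, v ≠ w → lcpLen u v.toList < k := by
        rw [List.countP_eq_zero]
        constructor
        · intro h v hv hvw
          by_contra hge
          have hlcp : k ≤ lcpLen u v.toList := by omega
          have hpref : pref (u.take k) v.toList = true := (pref_take_iff_lcp u v.toList k hk).mpr hlcp
          have hvne : v.toList ≠ u := fun hvu => hvw (toList_inj v w (by rw [hu] at hvu; exact hvu))
          have := h v.toList (List.mem_map_of_mem hv)
          simp [hpref, hvne] at this
        · intro h v hv
          rcases List.mem_map.mp hv with ⟨x, hx, rfl⟩
          by_cases hxw : x = w
          · subst hxw; simp [hu]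
          · have hlt := h x hx hxw
            have : ¬ pref (u.take k) x.toList = true := by
              rw [pref_take_iff_lcp u x.toList k hk]; omega
            simp [this]
      constructor
      · intro h
        have h0 : ws.countP (fun v => pref (u.take k) v && !(v == u)) = 0 := by omega
        have hall := hothers.mp h0
        have hkpos : 0 < k := by
          by_contra hk0
          have hk0' : k = 0 := by omega
          subst hk0'
          have hsp := countP_split ws (fun _ => true) (fun v => v == u)
          have e1 : ws.countP (fun _ => true) = ws.length := by simp
          have e2 : ws.countP (fun v => (fun _ => true) v && (v == u)) = ws.count u := by
            rw [List.count_eq_countP]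
            apply List.countP_congr
            intro v _
            simp
          have e3 : ws.countP (fun v => (fun _ => true) v && !(v == u))
              = ws.countP (fun v => pref (u.take 0) v && !(v == u)) := by
            apply List.countP_congr
            intro v _
            simp [pref]
          rw [e1, e2, e3, h0, hcount_ws, hc1] at hsp
          have e4 : ws.length = words.length := by simp [hws]
          omega
        rcases bestFold_src w words 0 with hb | ⟨v, hv, hvw, hb⟩
        · rw [← hbest] at hb
          rw [hb]
          exact hkpos
        · rw [← hbest] at hb
          rw [hb]
          exact hall v hv hvw
      · intro hbk
        have hlt : ∀ v ∈ words, v ≠ w → lcpLen u v.toList < k := by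
          intro v hv hvw
          have hle := bestFold_mem w words 0 v hv hvw
          rw [← hbest] at hle
          rw [hu]
          omega
        rw [hothers.mpr hlt]
    have := dSpec_min ws u best hC u [] (by simp)
    rw [this]
    have hble : best ≤ u.length := by
      rcases bestFold_src w words 0 with hb | ⟨v, hv, hvw, hb⟩
      · rw [← hbest] at hb; omega
      · rw [← hbest] at hb; rw [hb]; exact lcpLen_le_left u v.toList
    simp only [List.length_nil]
    omega

-- root characterisation
theorem root_cnt (words : List String) :
    ∀ q, subCnt (words.foldl (fun t w => Trie.insertGo t w.toList) Trie.emptyT) q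
      = (words.map String.toList).countP (fun w => pref q w) := by
  intro q
  rw [subCnt_build, subCnt_empty]
  simp

-- ===== VERDICT (by name: the statement is the Claim_ definition above) =====
theorem solution_spec : Claim_equal_solution := by
  unfold Claim_equal_solution Spec_solution
  intro words _
  unfold solution solution_alt
  dsimp only
  set ws := words.map String.toList with hws
  have hroot := root_cnt words
  set root := words.foldl (fun t w => Trie.insertGo t w.toList) Trie.emptyT with hrootdef
  by_cases hn : words.length ≤ 1
  · rw [if_pos hn]
    match words, hn with
    | [], _ => rfl
    | [w], _ =>
        have h1 : root.count = 1 := by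
          have := hroot []
          rw [subCnt_nil] at this
          rw [this]
          simp [pref]
        simp only [List.foldl_cons, List.foldl_nil]
        rw [Trie.findGo.eq_def]
        dsimp only
        rw [if_pos h1]
        simp
  · rw [if_neg hn]
    have hn2 : 2 ≤ words.length := by omega
    apply PySem.List.foldl_congr_mem
    intro acc w hw
    have hfind := find_spec ws root hroot w.toList [] root (by rw [subAt?])
      (by rw [List.nil_append]; exact List.mem_map_of_mem hw)
    simp only [List.length_nil] at hfind
    rw [hfind]
    have := perword words hn2 w hw
    rw [Option.getD_some, this]
    split_ifs <;> simp
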